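-- pv_equiv track=rewrite | github.com/petrlos/AoC_2022 | 25/25.py | snafu_plus_snafu
-- ===== SOURCE A (Python) =====
-- def snafu_plus_snafu(number1, number2):
--     if len(number1) < len(number2): #number1 must be always longer
--         number1, number2 = number2, number1
--     diff = len(number1) - len(number2)
--     number2 = "0"*diff + number2 #fill out number2 left with zeros
--     result = []
--     plus_one = 0
--     for char1, char2 in zip(reversed(number1), reversed(number2)):
--         #take digits from both numbers from left und sum up
--         new_digit = dictionary[char1] + dictionary[char2] + plus_one
--         plus_one = 0
--         if new_digit > 2: #if sum is larger than 2: next number must add +1, actual number number +5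
--             plus_one = 1
--             new_digit = new_digit - 5
--         elif new_digit < -2: #if sum is smaller than -2: next number must add -1, actual number number  +5
--             plus_one = -1
--             new_digit = new_digit + 5
--         result.append(new_digit)
--     if plus_one == 1:
--         result.append(1)
--     snafu = ""
--     for digit in reversed(result):
--         snafu += dictionary_back[digit]
--     return snafu
--
-- dictionary = dict(zip("210-=", range(2,-3,-1)))
--
-- dictionary_back = dict(zip(range(2,-3,-1),"210-=", ))
-- ===== SOURCE B (Python) =====
-- def snafu_plus_snafu(number1, number2):
--     values = {"2": 2, "1": 1, "0": 0, "-": -1, "=": -2}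
--     v1 = 0
--     for char in number1:
--         v1 = 5 * v1 + values[char]
--     v2 = 0
--     for char in number2:
--         v2 = 5 * v2 + values[char]
--     n = v1 + v2
--     digits = ""
--     while n != 0:
--         rem = (n + 2) % 5
--         digits = "=-012"[rem] + digits
--         n = (n + 2) // 5
--     return digits.rjust(max(len(number1), len(number2)), "0")
-- ===== Notes on version B (the rewrite author's own statement) =====
-- stated objective: simpler
-- what changed: Replaces A's digit-by-digit balanced-base-5 addition with carry propagation by decode-to-int, integer add, and re-encode via repeated balanced divmod, left-padded with '0' to the longer input's width.
-- intended difference: When the two inputs' balanced-base-5 values sum below the minimum value representable in max(len(number1),len(number2)) digits, A silently drops the final -1 carry and returns a wrong (too large) SNAFU of that width (e.g. '='+'=' -> '1'), while B returns the correct encoding of the sum (e.g. '-1'), which is the intended result of SNAFU addition. — e.g. on snafu_plus_snafu("=", "="): A returns "1", B returns "-1"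
import Mathlib
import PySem

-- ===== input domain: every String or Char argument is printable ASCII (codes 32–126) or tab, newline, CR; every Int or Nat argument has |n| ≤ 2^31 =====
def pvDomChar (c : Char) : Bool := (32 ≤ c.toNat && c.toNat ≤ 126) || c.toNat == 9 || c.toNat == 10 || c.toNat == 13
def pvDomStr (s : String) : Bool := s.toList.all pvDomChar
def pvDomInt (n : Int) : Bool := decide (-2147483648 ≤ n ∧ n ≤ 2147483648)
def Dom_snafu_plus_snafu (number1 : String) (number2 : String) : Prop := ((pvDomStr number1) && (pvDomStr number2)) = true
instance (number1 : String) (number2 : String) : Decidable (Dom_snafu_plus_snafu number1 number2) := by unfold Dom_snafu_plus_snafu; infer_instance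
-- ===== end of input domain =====

-- B replaces A's digit-by-digit carry addition with decode-to-Int / add / re-encode (balanced divmod),
-- left-padding with '0' to the longer input's width; on sums below the minimum value representable in
-- that width A drops a final -1 carry (wrong value), B returns the correct encoding (documented as D_).


-- ===== PORT A =====
-- dictionary = dict(zip("210-=", range(2,-3,-1)))
def pvDictA : PySem.Dict Char Int :=
  PySem.Dict.ofList ("210-=".toList.zip (PySem.List.pyRange 2 (-3) (-1)))
-- dictionary_back = dict(zip(range(2,-3,-1), "210-="))
def pvDictBackA : PySem.Dict Int Char :=
  PySem.Dict.ofList ((PySem.List.pyRange 2 (-3) (-1)).zip "210-=".toList)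

-- loop body of A (dictionary[c] raises KeyError outside "210-="; ported as getD, excluded by Pre_)
def pvAStep (st : List Int × Int) (p : Char × Char) : List Int × Int :=
  let nd := pvDictA.getD p.1 0 + pvDictA.getD p.2 0 + st.2
  if nd > 2 then (st.1 ++ [nd - 5], 1)
  else if nd < -2 then (st.1 ++ [nd + 5], -1)
  else (st.1 ++ [nd], 0)

-- the function body after the initial swap (number1 the longer)
def pvABody (l1 l2 : List Char) : List Char :=
  let diff : Int := (l1.length : Int) - (l2.length : Int)
  let l2p := List.replicate diff.toNat '0' ++ l2
  let st := (l1.reverse.zip l2p.reverse).foldl pvAStep ([], (0 : Int))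
  let result := if st.2 = 1 then st.1 ++ [(1 : Int)] else st.1
  result.reverse.foldl (fun acc d => acc ++ [pvDictBackA.getD d '?']) []

def snafu_plus_snafu (number1 : String) (number2 : String) : String :=
  if PySem.Str.len number1 < PySem.Str.len number2 then
    String.mk (pvABody number2.toList number1.toList)
  else
    String.mk (pvABody number1.toList number2.toList)

-- ===== PORT B =====
def pvDictB : PySem.Dict Char Int :=
  PySem.Dict.ofList [('2', 2), ('1', 1), ('0', 0), ('-', -1), ('=', -2)]

-- v = 0; for char in s: v = 5*v + values[char]   (values[char] raises outside "210-="; excluded by Pre_)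
def pvDecodeB (l : List Char) : Int := l.foldl (fun v c => 5 * v + pvDictB.getD c 0) 0

-- the while loop of B, with fuel |n|+1 (each iteration strictly shrinks |n|, see pvEncodeShrink)
def pvEncodeGo : Nat → Int → List Char
  | 0, _ => []
  | fuel + 1, n =>
    if n = 0 then []
    else pvEncodeGo fuel (PySem.Int.floordiv (n + 2) 5) ++
      [PySem.List.pyGetD "=-012".toList (PySem.Int.mod (n + 2) 5) '?']

def pvEncodeB (n : Int) : List Char := pvEncodeGo (n.natAbs + 1) n

-- digits.rjust(max(len(l1), len(l2)), "0"): hand-ported left-pad, exact for a one-char fill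
def pvBBody (l1 l2 : List Char) : List Char :=
  let digits := pvEncodeB (pvDecodeB l1 + pvDecodeB l2)
  List.replicate (max l1.length l2.length - digits.length) '0' ++ digits

def snafu_plus_snafu_alt (number1 : String) (number2 : String) : String :=
  String.mk (pvBBody number1.toList number2.toList)

-- ===== PRECONDITION & SPEC =====
-- Pre_ excludes exactly the inputs containing a character outside "210-=", on which A raises KeyError.
def pvSnafuChars : List Char := ['2', '1', '0', '-', '=']
def Pre_snafu_plus_snafu (number1 : String) (number2 : String) : Prop :=
  (number1.toList.all (pvSnafuChars.contains ·) && number2.toList.all (pvSnafuChars.contains ·)) = true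
instance (number1 : String) (number2 : String) : Decidable (Pre_snafu_plus_snafu number1 number2) := by
  unfold Pre_snafu_plus_snafu; infer_instance
def pvWitness_snafu_plus_snafu : String × String := ("12", "2=")

-- When the inputs' values (digit c is worth 2 - index of c in "210-=") sum below the minimum
-- representable in max(len(number1),len(number2)) balanced-base-5 digits, A drops the final -1
-- carry and returns a too-large value of that width (e.g. '='+'=' -> '1'), while B returns the
-- correct encoding of the sum ('-1'), the intended result.
def D_snafu_plus_snafu (number1 : String) (number2 : String) : Prop :=
  2 * (number1.toList.foldl (fun v c => 5 * v + 2 - ("210-=".toList.idxOf c : Int)) 0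
        + number2.toList.foldl (fun v c => 5 * v + 2 - ("210-=".toList.idxOf c : Int)) 0) <
    -((5 : Int) ^ (max number1.toList.length number2.toList.length) - 1)
instance (number1 : String) (number2 : String) : Decidable (D_snafu_plus_snafu number1 number2) := by
  unfold D_snafu_plus_snafu; infer_instance

def Spec_snafu_plus_snafu (number1 : String) (number2 : String) (out : String) : Prop :=
  ¬ D_snafu_plus_snafu number1 number2 → out = snafu_plus_snafu_alt number1 number2
instance (number1 : String) (number2 : String) (out : String) : Decidable (Spec_snafu_plus_snafu number1 number2 out) := by
  unfold Spec_snafu_plus_snafu; infer_instance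

def pvDiffWitness_snafu_plus_snafu : String × String := ("=", "=")
def pvDiffWitnessOut_snafu_plus_snafu : String × String := ("1", "-1")

-- ===== CLAIM =====
def Claim_unchanged_snafu_plus_snafu : Prop := ∀ (number1 : String) (number2 : String), Dom_snafu_plus_snafu number1 number2 → Pre_snafu_plus_snafu number1 number2 → Spec_snafu_plus_snafu number1 number2 (snafu_plus_snafu number1 number2)
def Claim_changed_snafu_plus_snafu : Prop := Dom_snafu_plus_snafu (pvDiffWitness_snafu_plus_snafu.1) (pvDiffWitness_snafu_plus_snafu.2) ∧ Pre_snafu_plus_snafu (pvDiffWitness_snafu_plus_snafu.1) (pvDiffWitness_snafu_plus_snafu.2) ∧ D_snafu_plus_snafu (pvDiffWitness_snafu_plus_snafu.1) (pvDiffWitness_snafu_plus_snafu.2) ∧ snafu_plus_snafu (pvDiffWitness_snafu_plus_snafu.1) (pvDiffWitness_snafu_plus_snafu.2) = pvDiffWitnessOut_snafu_plus_snafu.1 ∧ snafu_plus_snafu_alt (pvDiffWitness_snafu_plus_snafu.1) (pvDiffWitness_snafu_plus_snafu.2) = pvDiffWitnessOut_snafu_plus_snafu.2 ∧ pvDiffWitnessOut_snafu_plus_snafu.1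 ≠ pvDiffWitnessOut_snafu_plus_snafu.2
def Claim_exact_snafu_plus_snafu : Prop := ∀ (number1 : String) (number2 : String), Dom_snafu_plus_snafu number1 number2 → Pre_snafu_plus_snafu number1 number2 → D_snafu_plus_snafu number1 number2 → snafu_plus_snafu number1 number2 ≠ snafu_plus_snafu_alt number1 number2

-- ===== LEMMAS AND PROOFS =====

-- proof-side digit value and balanced-base-5 valuation
def pvDv (c : Char) : Int :=
  if c = '2' then 2 else if c = '1' then 1 else if c = '0' then 0
  else if c = '-' then -1 else if c = '=' then -2 else 0
def pvVal : List Char → Int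
  | [] => 0
  | c :: r => pvDv c * 5 ^ r.length + pvVal r

-- proof-side digit-to-char table (mirrors dictionary_back's value on the digits that occur)
def pvBd (d : Int) : Char :=
  if d = 2 then '2' else if d = 1 then '1' else if d = 0 then '0'
  else if d = -1 then '-' else if d = -2 then '=' else '?'

theorem pvDictA_getD (c : Char) : pvDictA.getD c 0 = pvDv c := by
  have h : pvDictA = PySem.Dict.mk [('2',2),('1',1),('0',0),('-',-1),('=',-2)] := by decide
  rw [h]
  by_cases e2 : c = '2'
  · subst e2; decide
  by_cases e1 : c = '1'
  · subst e1; decide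
  by_cases e0 : c = '0'
  · subst e0; decide
  by_cases em : c = '-'
  · subst em; decide
  by_cases ee : c = '='
  · subst ee; decide
  have b2 : ('2' == c) = false := beq_eq_false_iff_ne.mpr (fun hh => e2 hh.symm)
  have b1 : ('1' == c) = false := beq_eq_false_iff_ne.mpr (fun hh => e1 hh.symm)
  have b0 : ('0' == c) = false := beq_eq_false_iff_ne.mpr (fun hh => e0 hh.symm)
  have bm : ('-' == c) = false := beq_eq_false_iff_ne.mpr (fun hh => em hh.symm)
  have be : ('=' == c) = false := beq_eq_false_iff_ne.mpr (fun hh => ee hh.symm)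
  rw [pvDv]
  simp [PySem.Dict.getD_eq_get?_getD, PySem.Dict.get?_mk_cons, b2, b1, b0, bm, be, e2, e1, e0, em, ee]
  rfl

theorem pvDictB_getD (c : Char) : pvDictB.getD c 0 = pvDv c := by
  have h : pvDictB = pvDictA := by decide
  rw [h]; exact pvDictA_getD c

theorem pvDictBackA_getD (d : Int) : pvDictBackA.getD d '?' = pvBd d := by
  have h : pvDictBackA = PySem.Dict.mk [(2,'2'),(1,'1'),(0,'0'),(-1,'-'),(-2,'=')] := by decide
  rw [h]
  by_cases e2 : d = 2
  · subst e2; decide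
  by_cases e1 : d = 1
  · subst e1; decide
  by_cases e0 : d = 0
  · subst e0; decide
  by_cases em : d = -1
  · subst em; decide
  by_cases ee : d = -2
  · subst ee; decide
  have b2 : ((2 : Int) == d) = false := beq_eq_false_iff_ne.mpr (fun hh => e2 hh.symm)
  have b1 : ((1 : Int) == d) = false := beq_eq_false_iff_ne.mpr (fun hh => e1 hh.symm)
  have b0 : ((0 : Int) == d) = false := beq_eq_false_iff_ne.mpr (fun hh => e0 hh.symm)
  have bm : ((-1 : Int) == d) = false := beq_eq_false_iff_ne.mpr (fun hh => em hh.symm)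
  have be : ((-2 : Int) == d) = false := beq_eq_false_iff_ne.mpr (fun hh => ee hh.symm)
  rw [pvBd]
  simp [PySem.Dict.getD_eq_get?_getD, PySem.Dict.get?_mk_cons, b2, b1, b0, bm, be, e2, e1, e0, em, ee]
  rfl

theorem pvDv_range (c : Char) : -2 ≤ pvDv c ∧ pvDv c ≤ 2 := by
  unfold pvDv; split_ifs <;> omega

-- value of an Int digit list, least-significant first
def pvLsb (l : List Int) : Int := l.foldr (fun d a => d + 5 * a) 0

@[simp] theorem pvLsb_nil : pvLsb [] = 0 := rfl
@[simp] theorem pvLsb_cons (d : Int) (r : List Int) : pvLsb (d :: r) = d + 5 * pvLsb r := rfl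

theorem pvLsb_append_singleton (xs : List Int) (d : Int) :
    pvLsb (xs ++ [d]) = pvLsb xs + d * 5 ^ xs.length := by
  induction xs with
  | nil => simp
  | cons x r ih => simp [ih, pow_succ]; ring

theorem pvDecode_foldl (l : List Char) (v : Int) :
    l.foldl (fun v c => 5 * v + pvDv c) v = v * 5 ^ l.length + pvVal l := by
  induction l generalizing v with
  | nil => simp [pvVal]
  | cons c r ih => simp [List.foldl_cons, ih, pvVal, pow_succ]; ring

theorem pvDecodeB_eq (l : List Char) : pvDecodeB l = pvVal l := by
  unfold pvDecodeB
  have h : (fun (v : Int) (c : Char) => 5 * v + pvDictB.getD c 0)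
      = (fun (v : Int) (c : Char) => 5 * v + pvDv c) := by
    funext v c; rw [pvDictB_getD]
  rw [h, pvDecode_foldl]; simp

-- D_'s inlined valuation equals pvVal on snafu strings
theorem pvDVal_eq (l : List Char) (h : ∀ c ∈ l, c ∈ pvSnafuChars) :
    l.foldl (fun v c => 5 * v + 2 - ("210-=".toList.idxOf c : Int)) 0 = pvVal l := by
  have h1 : ∀ (acc : Int) (c : Char), c ∈ l →
      5 * acc + 2 - ("210-=".toList.idxOf c : Int) = 5 * acc + pvDv c := by
    intro acc c hc
    have hm := h c hc
    simp only [pvSnafuChars, List.mem_cons, List.not_mem_nil, or_false] at hm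
    rcases hm with rfl | rfl | rfl | rfl | rfl <;> simp [pvDv] <;> omega
  refine Eq.trans (PySem.List.foldl_congr_mem l _ (fun v c => 5 * v + pvDv c) 0 h1) ?_
  rw [pvDecode_foldl]
  simp

theorem pvVal_eq_lsb (l : List Char) : pvVal l = pvLsb (l.reverse.map pvDv) := by
  induction l with
  | nil => simp [pvVal]
  | cons c r ih =>
    simp [pvVal, ih, pvLsb_append_singleton]
    ring

theorem pvZip_sum : ∀ (u v : List Char), u.length = v.length →
    pvLsb ((u.zip v).map (fun p => pvDv p.1 + pvDv p.2))
      = pvLsb (u.map pvDv) + pvLsb (v.map pvDv) := by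
  intro u
  induction u with
  | nil =>
    intro v h
    have hv : v = [] := List.length_eq_zero_iff.mp h.symm
    simp [hv]
  | cons x u ih =>
    intro v h
    cases v with
    | nil => simp at h
    | cons y v =>
      simp at h
      simp [ih v h]; ring

theorem pvVal_pad : ∀ (k : Nat) (l : List Char), pvVal (List.replicate k '0' ++ l) = pvVal l := by
  intro k
  induction k with
  | zero => simp
  | succ k ih =>
    intro l
    simp only [List.replicate_succ, List.cons_append, pvVal, ih]
    have h0 : pvDv '0' = 0 := by decide
    simp [h0]

-- the carry step of A
def pvStepD (x c : Int) : Int := if x + c > 2 then x + c - 5 else if x + c < -2 then x + c + 5 else x + c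
def pvStepC (x c : Int) : Int := if x + c > 2 then 1 else if x + c < -2 then -1 else 0

def pvDigits : List Int → Int → List Int
  | [], _ => []
  | x :: r, c => pvStepD x c :: pvDigits r (pvStepC x c)

def pvCarryF : List Int → Int → Int
  | [], c => c
  | x :: r, c => pvCarryF r (pvStepC x c)

theorem pvFoldl_pvAStep : ∀ (ps : List (Char × Char)) (acc : List Int) (c : Int),
    ps.foldl pvAStep (acc, c)
      = (acc ++ pvDigits (ps.map (fun p => pvDv p.1 + pvDv p.2)) c,
         pvCarryF (ps.map (fun p => pvDv p.1 + pvDv p.2)) c) := by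
  intro ps
  induction ps with
  | nil => intro acc c; simp [pvDigits, pvCarryF]
  | cons p ps ih =>
    intro acc c
    have hstep : pvAStep (acc, c) p = (acc ++ [pvStepD (pvDv p.1 + pvDv p.2) c], pvStepC (pvDv p.1 + pvDv p.2) c) := by
      simp only [pvAStep, pvDictA_getD, pvStepD, pvStepC]
      split_ifs with h1 h2 <;> simp
    simp only [List.foldl_cons, hstep, ih, List.map_cons, pvDigits, pvCarryF]
    simp

theorem pvDigits_length : ∀ (xs : List Int) (c : Int), (pvDigits xs c).length = xs.length := by
  intro xs
  induction xs with
  | nil => intro c; rfl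
  | cons x r ih => intro c; simp [pvDigits, ih]

theorem pvDigits_val : ∀ (xs : List Int) (c : Int),
    pvLsb (pvDigits xs c) + pvCarryF xs c * 5 ^ xs.length = pvLsb xs + c := by
  intro xs
  induction xs with
  | nil => intro c; simp [pvDigits, pvCarryF]
  | cons x r ih =>
    intro c
    simp only [pvDigits, pvCarryF, pvLsb_cons, List.length_cons]
    unfold pvStepD pvStepC
    split_ifs with h1 h2
    · linear_combination 5 * ih 1
    · linear_combination 5 * ih (-1)
    · linear_combination 5 * ih 0

theorem pvDigits_range : ∀ (xs : List Int) (c : Int),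
    (∀ x ∈ xs, -4 ≤ x ∧ x ≤ 4) → -1 ≤ c → c ≤ 1 →
    ((-1 ≤ pvCarryF xs c ∧ pvCarryF xs c ≤ 1) ∧ ∀ d ∈ pvDigits xs c, -2 ≤ d ∧ d ≤ 2) := by
  intro xs
  induction xs with
  | nil => intro c _ h1 h2; exact ⟨⟨h1, h2⟩, by simp [pvDigits]⟩
  | cons x r ih =>
    intro c hx h1 h2
    have hx0 := hx x (by simp)
    have hc' : -1 ≤ pvStepC x c ∧ pvStepC x c ≤ 1 := by
      unfold pvStepC; split_ifs <;> omega
    have hd0 : -2 ≤ pvStepD x c ∧ pvStepD x c ≤ 2 := by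
      unfold pvStepD; split_ifs <;> omega
    have hr := ih (pvStepC x c) (fun y hy => hx y (by simp [hy])) hc'.1 hc'.2
    refine ⟨by simpa [pvCarryF] using hr.1, ?_⟩
    intro d hd
    simp only [pvDigits, List.mem_cons] at hd
    rcases hd with rfl | hd
    · exact hd0
    · exact hr.2 d hd

theorem pvLsb_bound : ∀ (xs : List Int), (∀ d ∈ xs, -2 ≤ d ∧ d ≤ 2) →
    -((5 : Int) ^ xs.length - 1) ≤ 2 * pvLsb xs ∧ 2 * pvLsb xs ≤ (5 : Int) ^ xs.length - 1 := by
  intro xs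
  induction xs with
  | nil => intro _; simp
  | cons x r ih =>
    intro h
    have hx := h x (by simp)
    have hr := ih (fun y hy => h y (by simp [hy]))
    simp only [pvLsb_cons, List.length_cons] at *
    rw [pow_succ] at *
    constructor <;> nlinarith [hr.1, hr.2]

theorem pvLsb_zero_all : ∀ (xs : List Int), (∀ d ∈ xs, -2 ≤ d ∧ d ≤ 2) → pvLsb xs = 0 →
    ∀ d ∈ xs, d = 0 := by
  intro xs
  induction xs with
  | nil => intro _ _ d hd; simp at hd
  | cons x r ih =>
    intro h h0 d hd
    have hx := h x (by simp)
    simp only [pvLsb_cons] at h0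
    have hx0 : x = 0 ∧ pvLsb r = 0 := by omega
    rcases List.mem_cons.mp hd with rfl | hd
    · exact hx0.1
    · exact ih (fun y hy => h y (by simp [hy])) hx0.2 d hd

theorem pvLsb_of_all_zero : ∀ (xs : List Int), (∀ d ∈ xs, d = 0) → pvLsb xs = 0 := by
  intro xs
  induction xs with
  | nil => simp
  | cons x r ih =>
    intro h
    have hx := h x (by simp)
    have hr := ih (fun d hd => h d (by simp [hd]))
    simp [hx, hr]

-- drop the high-order (trailing, in LSB-first order) zeros
def pvTrim : List Int → List Int
  | [] => []
  | d :: r => if pvTrim r = [] then (if d = 0 then [] else [d]) else d :: pvTrim r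

theorem pvTrim_nil_iff : ∀ (xs : List Int), pvTrim xs = [] ↔ ∀ d ∈ xs, d = 0 := by
  intro xs
  induction xs with
  | nil => simp [pvTrim]
  | cons x r ih =>
    by_cases h : pvTrim r = []
    · by_cases hx : x = 0
      · have ht : pvTrim (x :: r) = [] := by simp [pvTrim, h, hx]
        rw [ht]
        constructor
        · intro _ d hd
          rcases List.mem_cons.mp hd with rfl | hd
          · exact hx
          · exact ih.mp h d hd
        · intro _; rfl
      · simp [pvTrim, h, hx]
    · have : ¬ ∀ d ∈ r, d = 0 := fun hz => h (ih.mpr hz)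
      simp only [pvTrim, if_neg h]
      constructor
      · intro hc; simp at hc
      · intro hc; exact absurd (fun d hd => hc d (by simp [hd])) this

theorem pvTrim_length_le : ∀ (xs : List Int), (pvTrim xs).length ≤ xs.length := by
  intro xs
  induction xs with
  | nil => simp [pvTrim]
  | cons x r ih =>
    by_cases h : pvTrim r = []
    · by_cases hx : x = 0 <;> simp [pvTrim, h, hx]
    · simp only [pvTrim, if_neg h, List.length_cons]
      omega

theorem pvTrim_append_nonzero (d : Int) (hd : d ≠ 0) :
    ∀ (xs : List Int), pvTrim (xs ++ [d]) = xs ++ [d] := by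
  intro xs
  induction xs with
  | nil => simp [pvTrim, hd]
  | cons x r ih =>
    have hne : pvTrim (r ++ [d]) ≠ [] := by simp [ih]
    simp [pvTrim, ih]

theorem pvPad_trim : ∀ (xs : List Int),
    List.replicate (xs.length - (pvTrim xs).length) (0 : Int) ++ (pvTrim xs).reverse = xs.reverse := by
  intro xs
  induction xs with
  | nil => simp [pvTrim]
  | cons x r ih =>
    by_cases h : pvTrim r = []
    · have hz : ∀ y ∈ r, y = 0 := (pvTrim_nil_iff r).mp h
      have hr : r = List.replicate r.length 0 := List.eq_replicate_of_mem hz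
      by_cases hx : x = 0
      · subst hx
        have ht : pvTrim ((0 : Int) :: r) = [] := by simp [pvTrim, h]
        have hrev : ((0 : Int) :: r).reverse = List.replicate (r.length + 1) 0 := by
          rw [List.reverse_cons]
          conv_lhs => rw [hr]
          simp [List.replicate_succ']
        rw [ht, hrev]
        simp
      · have ht : pvTrim (x :: r) = [x] := by simp [pvTrim, h, hx]
        rw [ht]
        rw [List.reverse_cons]
        conv_rhs => rw [hr]
        simp
    · simp only [pvTrim, if_neg h]
      have hle := pvTrim_length_le r
      rw [List.reverse_cons, List.reverse_cons, ← ih]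
      simp only [List.length_cons]
      rw [show r.length + 1 - ((pvTrim r).length + 1) = r.length - (pvTrim r).length by omega]
      simp [List.append_assoc]

theorem pvEncodeShrink (n : Int) (h : n ≠ 0) :
    (PySem.Int.floordiv (n + 2) 5).natAbs < n.natAbs := by
  rw [PySem.Int.floordiv_eq_ediv_of_pos (by norm_num)]
  omega

theorem pvEncodeGo_fuel : ∀ (f g : Nat) (n : Int), n.natAbs < f → n.natAbs < g →
    pvEncodeGo f n = pvEncodeGo g n := by
  intro f
  induction f with
  | zero => intro g n hf; omega
  | succ f ih =>
    intro g n hf hg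
    cases g with
    | zero => omega
    | succ g =>
      by_cases h : n = 0
      · simp [pvEncodeGo, h]
      · have hs := pvEncodeShrink n h
        simp only [pvEncodeGo, if_neg h]
        rw [ih g (PySem.Int.floordiv (n + 2) 5) (by omega) (by omega)]

theorem pvEncodeB_zero : pvEncodeB 0 = [] := by
  simp [pvEncodeB, pvEncodeGo]

theorem pvEncodeB_step (n : Int) (h : n ≠ 0) :
    pvEncodeB n = pvEncodeB (PySem.Int.floordiv (n + 2) 5) ++
      [PySem.List.pyGetD "=-012".toList (PySem.Int.mod (n + 2) 5) '?'] := by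
  have hs := pvEncodeShrink n h
  unfold pvEncodeB
  conv_lhs => rw [pvEncodeGo]
  rw [if_neg h, pvEncodeGo_fuel n.natAbs ((PySem.Int.floordiv (n + 2) 5).natAbs + 1)
      (PySem.Int.floordiv (n + 2) 5) (by omega) (by omega)]

theorem pvEncode_eq : ∀ (xs : List Int), (∀ d ∈ xs, -2 ≤ d ∧ d ≤ 2) →
    pvEncodeB (pvLsb xs) = (pvTrim xs).reverse.map pvBd := by
  intro xs
  induction xs with
  | nil => simpa [pvTrim] using pvEncodeB_zero
  | cons d r ih =>
    intro h
    have hd := h d (by simp)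
    have hr := fun y hy => h y (List.mem_cons_of_mem _ hy)
    by_cases hv : pvLsb (d :: r) = 0
    · have hall := pvLsb_zero_all (d :: r) h hv
      have ht : pvTrim (d :: r) = [] := (pvTrim_nil_iff (d :: r)).mpr hall
      rw [hv, ht, pvEncodeB_zero]; rfl
    · have hstep := pvEncodeB_step (pvLsb (d :: r)) hv
      have hval : pvLsb (d :: r) = d + 5 * pvLsb r := by simp
      have hfd : PySem.Int.floordiv (pvLsb (d :: r) + 2) 5 = pvLsb r := by
        rw [PySem.Int.floordiv_eq_ediv_of_pos (by norm_num), hval]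
        omega
      have hmd : PySem.Int.mod (pvLsb (d :: r) + 2) 5 = d + 2 := by
        rw [PySem.Int.mod_eq_emod_of_pos (by norm_num), hval]
        omega
      have hch : PySem.List.pyGetD "=-012".toList (d + 2) '?' = pvBd d := by
        obtain ⟨hd1, hd2⟩ := hd
        interval_cases d <;> decide
      rw [hstep, hfd, hmd, hch, ih hr]
      by_cases htr : pvTrim r = []
      · have hw : pvLsb r = 0 := pvLsb_of_all_zero r ((pvTrim_nil_iff r).mp htr)
        have hdne : d ≠ 0 := by
          intro hd0; apply hv; simp [hd0, hw]
        have ht : pvTrim (d :: r) = [d] := by simp [pvTrim, htr, hdne]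
        rw [ht, htr]
        rfl
      · have ht : pvTrim (d :: r) = d :: pvTrim r := by simp [pvTrim, htr]
        rw [ht, List.reverse_cons, List.map_append]
        rfl

theorem pvVal_bound (l : List Char) :
    -((5 : Int) ^ l.length - 1) ≤ 2 * pvVal l ∧ 2 * pvVal l ≤ (5 : Int) ^ l.length - 1 := by
  have h := pvLsb_bound (l.reverse.map pvDv)
    (by intro d hd; obtain ⟨c, _, rfl⟩ := List.mem_map.mp hd; exact pvDv_range c)
  rw [pvVal_eq_lsb]
  simpa using h

theorem pvEncodeB_len_le : ∀ (k : Nat) (n : Int),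
    -((5 : Int) ^ k - 1) ≤ 2 * n → 2 * n ≤ (5 : Int) ^ k - 1 → (pvEncodeB n).length ≤ k := by
  intro k
  induction k with
  | zero =>
    intro n h1 h2
    have hn : n = 0 := by simp at h1 h2; omega
    simp [hn, pvEncodeB_zero]
  | succ k ih =>
    intro n h1 h2
    by_cases hn : n = 0
    · simp [hn, pvEncodeB_zero]
    · rw [pvEncodeB_step n hn]
      have hw : PySem.Int.floordiv (n + 2) 5 = (n + 2) / 5 :=
        PySem.Int.floordiv_eq_ediv_of_pos (by norm_num)
      have hodd : (5 : Int) ^ k % 2 = 1 := Int.odd_iff.mp (Odd.pow (by decide))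
      have hps : (5 : Int) ^ (k + 1) = 5 * 5 ^ k := by ring
      rw [hps] at h1 h2
      have hb : -((5 : Int) ^ k - 1) ≤ 2 * ((n + 2) / 5) ∧ 2 * ((n + 2) / 5) ≤ (5 : Int) ^ k - 1 := by
        generalize hP : (5 : Int) ^ k = P at *
        omega
      have := ih ((n + 2) / 5) hb.1 hb.2
      rw [hw]
      simp only [List.length_append, List.length_cons, List.length_nil]
      omega

theorem pvEncodeB_len_gt : ∀ (k : Nat) (n : Int),
    2 * n < -((5 : Int) ^ k - 1) → k + 1 ≤ (pvEncodeB n).length := by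
  intro k
  induction k with
  | zero =>
    intro n h
    have hn : n ≠ 0 := by simp at h; omega
    rw [pvEncodeB_step n hn]
    simp
  | succ k ih =>
    intro n h
    have hP1 : (1 : Int) ≤ 5 ^ (k + 1) := one_le_pow₀ (by norm_num)
    have hn : n ≠ 0 := by intro h0; rw [h0] at h; omega
    rw [pvEncodeB_step n hn]
    have hw : PySem.Int.floordiv (n + 2) 5 = (n + 2) / 5 :=
      PySem.Int.floordiv_eq_ediv_of_pos (by norm_num)
    have hodd : (5 : Int) ^ k % 2 = 1 := Int.odd_iff.mp (Odd.pow (by decide))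
    have hps : (5 : Int) ^ (k + 1) = 5 * 5 ^ k := by ring
    rw [hps] at h
    have hb : 2 * ((n + 2) / 5) < -((5 : Int) ^ k - 1) := by
      generalize hP : (5 : Int) ^ k = P at *
      omega
    have := ih ((n + 2) / 5) hb
    rw [hw]
    simp only [List.length_append, List.length_cons, List.length_nil]
    omega

theorem pvABody_len_of_low (a b : List Char) (hlen : b.length ≤ a.length)
    (hd : 2 * (pvVal a + pvVal b) < -((5 : Int) ^ a.length - 1)) :
    (pvABody a b).length = a.length := by
  have hdiff : (((a.length : Int)) - ((b.length : Int))).toNat = a.length - b.length := by omega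
  simp only [pvABody, hdiff]
  set l2p := List.replicate (a.length - b.length) '0' ++ b with hl2p
  have hl2plen : l2p.length = a.length := by simp [hl2p]; omega
  set xs := ((a.reverse.zip l2p.reverse).map (fun p => pvDv p.1 + pvDv p.2)) with hxs
  rw [pvFoldl_pvAStep (a.reverse.zip l2p.reverse) [] 0]
  set D := pvDigits xs 0 with hD
  set C := pvCarryF xs 0 with hC
  have hxslen : xs.length = a.length := by
    simp [hxs, List.length_zip, hl2plen]
  have hxval : pvLsb xs = pvVal a + pvVal b := by
    rw [hxs, pvZip_sum a.reverse l2p.reverse (by simp [hl2plen]), ← pvVal_eq_lsb, ← pvVal_eq_lsb,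
      hl2p, pvVal_pad]
  have hxrange : ∀ x ∈ xs, -4 ≤ x ∧ x ≤ 4 := by
    intro x hx
    rw [hxs] at hx
    obtain ⟨p, _, rfl⟩ := List.mem_map.mp hx
    have h1 := pvDv_range p.1
    have h2 := pvDv_range p.2
    omega
  have hrange := pvDigits_range xs 0 hxrange (by norm_num) (by norm_num)
  have hval := pvDigits_val xs 0
  rw [hxslen] at hval
  have hDlen : D.length = a.length := by rw [hD, pvDigits_length, hxslen]
  have hDbound := pvLsb_bound D hrange.2
  rw [hDlen] at hDbound
  have hP : (1 : Int) ≤ 5 ^ a.length := one_le_pow₀ (by norm_num)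
  have hC1 : C ≠ 1 := by
    intro hC1
    rw [← hD, ← hC, hC1, hxval] at hval
    generalize hPP : (5 : Int) ^ a.length = P at *
    omega
  rw [if_neg (by simpa using hC1)]
  have hback : (fun (acc : List Char) (d : Int) => acc ++ [pvDictBackA.getD d '?'])
      = (fun (acc : List Char) (d : Int) => acc ++ [pvBd d]) := by
    funext acc d; rw [pvDictBackA_getD]
  rw [hback, PySem.List.foldl_append_singleton_eq_map]
  simp [hDlen]

theorem pvBBody_len_of_low (a b : List Char) (hlen : b.length ≤ a.length)
    (hd : 2 * (pvVal a + pvVal b) < -((5 : Int) ^ a.length - 1)) :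
    (pvBBody a b).length = a.length + 1 := by
  have hb1 := pvVal_bound a
  have hb2 := pvVal_bound b
  have hle : (5 : Int) ^ b.length ≤ 5 ^ a.length := pow_le_pow_right₀ (by norm_num) hlen
  have hps : (5 : Int) ^ (a.length + 1) = 5 * 5 ^ a.length := by ring
  have hlo : -((5 : Int) ^ (a.length + 1) - 1) ≤ 2 * (pvVal a + pvVal b) := by
    rw [hps]
    generalize hP : (5 : Int) ^ a.length = P at *
    generalize hQ : (5 : Int) ^ b.length = Q at *
    omega
  have hhi : 2 * (pvVal a + pvVal b) ≤ (5 : Int) ^ (a.length + 1) - 1 := by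
    have hP1 : (1 : Int) ≤ 5 ^ (a.length + 1) := one_le_pow₀ (by norm_num)
    have hP : (1 : Int) ≤ 5 ^ a.length := one_le_pow₀ (by norm_num)
    omega
  have htlen : (pvEncodeB (pvVal a + pvVal b)).length = a.length + 1 :=
    Nat.le_antisymm (pvEncodeB_len_le (a.length + 1) _ hlo hhi) (pvEncodeB_len_gt a.length _ hd)
  simp only [pvBBody, pvDecodeB_eq, htlen, List.length_append, List.length_replicate,
    Nat.max_eq_left hlen]
  omega

theorem pvCore (a b : List Char) (hlen : b.length ≤ a.length)
    (hnd : -((5 : Int) ^ a.length - 1) ≤ 2 * (pvVal a + pvVal b)) :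
    pvABody a b = pvBBody a b := by
  have hdiff : (((a.length : Int)) - ((b.length : Int))).toNat = a.length - b.length := by omega
  simp only [pvABody, pvBBody, hdiff]
  set l2p := List.replicate (a.length - b.length) '0' ++ b with hl2p
  have hl2plen : l2p.length = a.length := by simp [hl2p]; omega
  set xs := ((a.reverse.zip l2p.reverse).map (fun p => pvDv p.1 + pvDv p.2)) with hxs
  rw [pvFoldl_pvAStep (a.reverse.zip l2p.reverse) [] 0]
  set D := pvDigits xs 0 with hD
  set C := pvCarryF xs 0 with hC
  have hxslen : xs.length = a.length := by
    simp [hxs, List.length_zip, hl2plen]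
  have hxval : pvLsb xs = pvVal a + pvVal b := by
    rw [hxs, pvZip_sum a.reverse l2p.reverse (by simp [hl2plen]), ← pvVal_eq_lsb, ← pvVal_eq_lsb,
      hl2p, pvVal_pad]
  have hxrange : ∀ x ∈ xs, -4 ≤ x ∧ x ≤ 4 := by
    intro x hx
    rw [hxs] at hx
    obtain ⟨p, _, rfl⟩ := List.mem_map.mp hx
    have h1 := pvDv_range p.1
    have h2 := pvDv_range p.2
    omega
  have hrange := pvDigits_range xs 0 hxrange (by norm_num) (by norm_num)
  have hval := pvDigits_val xs 0
  rw [hxslen] at hval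
  have hDlen : D.length = a.length := by rw [hD, pvDigits_length, hxslen]
  have hDbound := pvLsb_bound D hrange.2
  rw [hDlen] at hDbound
  have hP : (1 : Int) ≤ 5 ^ a.length := one_le_pow₀ (by norm_num)
  have hCne : C ≠ -1 := by
    intro hCm
    rw [← hD, ← hC, hCm] at hval
    rw [hxval] at hval
    generalize hPP : (5 : Int) ^ a.length = P at *
    omega
  rw [← hD, ← hC] at hval
  have hdec : pvDecodeB a + pvDecodeB b = pvVal a + pvVal b := by
    rw [pvDecodeB_eq, pvDecodeB_eq]
  have hmax : max a.length b.length = a.length := Nat.max_eq_left hlen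
  have hback : (fun (acc : List Char) (d : Int) => acc ++ [pvDictBackA.getD d '?'])
      = (fun (acc : List Char) (d : Int) => acc ++ [pvBd d]) := by
    funext acc d; rw [pvDictBackA_getD]
  rcases (by omega : C = 0 ∨ C = 1) with hC0 | hC1
  · rw [if_neg (by omega)]
    have hlsbD : pvLsb D = pvVal a + pvVal b := by
      rw [hC0] at hval; simpa [hxval] using hval
    rw [hdec, hmax, ← hlsbD, pvEncode_eq D hrange.2, hback,
      PySem.List.foldl_append_singleton_eq_map]
    have hpad := congrArg (List.map pvBd) (pvPad_trim D)
    simp only [List.map_append, List.map_replicate] at hpad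
    rw [show pvBd 0 = '0' from rfl] at hpad
    simp only [List.nil_append]
    rw [show (List.map pvBd (pvTrim D).reverse).length = (pvTrim D).length by simp, ← hDlen, hpad]
  · rw [if_pos hC1]
    have hres : pvLsb (D ++ [1]) = pvVal a + pvVal b := by
      rw [pvLsb_append_singleton, hDlen]
      rw [hC1] at hval
      rw [hxval] at hval
      omega
    have hresrange : ∀ d ∈ D ++ [1], -2 ≤ d ∧ d ≤ 2 := by
      intro d hd
      rcases List.mem_append.mp hd with hd | hd
      · exact hrange.2 d hd
      · simp at hd; omega
    rw [hdec, hmax, ← hres, pvEncode_eq (D ++ [1]) hresrange, hback,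
      PySem.List.foldl_append_singleton_eq_map,
      pvTrim_append_nonzero 1 one_ne_zero D]
    simp only [List.nil_append]
    have hlen2 : (List.map pvBd (D ++ [1]).reverse).length = a.length + 1 := by simp [hDlen]
    rw [hlen2, show a.length - (a.length + 1) = 0 from by omega]
    simp [List.map_reverse]

theorem pvBBody_comm (a b : List Char) : pvBBody a b = pvBBody b a := by
  unfold pvBBody
  rw [Int.add_comm, Nat.max_comm]

-- ===== VERDICT =====
theorem snafu_plus_snafu_spec : Claim_unchanged_snafu_plus_snafu := by
  intro n1 n2 _ hpre
  unfold Pre_snafu_plus_snafu at hpre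
  simp only [Bool.and_eq_true, List.all_eq_true] at hpre
  have hp1 : ∀ c ∈ n1.toList, c ∈ pvSnafuChars := fun c hc => by simpa using hpre.1 c hc
  have hp2 : ∀ c ∈ n2.toList, c ∈ pvSnafuChars := fun c hc => by simpa using hpre.2 c hc
  unfold Spec_snafu_plus_snafu
  intro hnd
  unfold D_snafu_plus_snafu at hnd
  rw [pvDVal_eq n1.toList hp1, pvDVal_eq n2.toList hp2] at hnd
  rw [not_lt] at hnd
  unfold snafu_plus_snafu snafu_plus_snafu_alt
  rw [PySem.Str.len_eq, PySem.Str.len_eq]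
  by_cases h : (n1.toList.length : Int) < (n2.toList.length : Int)
  · rw [if_pos h]
    have hlen : n1.toList.length ≤ n2.toList.length := by exact_mod_cast le_of_lt h
    rw [Nat.max_eq_right hlen] at hnd
    rw [pvCore n2.toList n1.toList hlen (by linarith [hnd]), pvBBody_comm]
  · rw [if_neg h]
    have hlen : n2.toList.length ≤ n1.toList.length := by
      rw [not_lt] at h; exact_mod_cast h
    rw [Nat.max_eq_left hlen] at hnd
    rw [pvCore n1.toList n2.toList hlen (by linarith [hnd])]

theorem pvToList_mk (l : List Char) : (String.mk l).toList = l :=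
  Eq.symm (String.ofList_eq.mp rfl)

theorem snafu_plus_snafu_tight : Claim_exact_snafu_plus_snafu := by
  intro n1 n2 _ hpre hd
  unfold Pre_snafu_plus_snafu at hpre
  simp only [Bool.and_eq_true, List.all_eq_true] at hpre
  have hp1 : ∀ c ∈ n1.toList, c ∈ pvSnafuChars := fun c hc => by simpa using hpre.1 c hc
  have hp2 : ∀ c ∈ n2.toList, c ∈ pvSnafuChars := fun c hc => by simpa using hpre.2 c hc
  unfold D_snafu_plus_snafu at hd
  rw [pvDVal_eq n1.toList hp1, pvDVal_eq n2.toList hp2] at hd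
  unfold snafu_plus_snafu snafu_plus_snafu_alt
  rw [PySem.Str.len_eq, PySem.Str.len_eq]
  by_cases h : (n1.toList.length : Int) < (n2.toList.length : Int)
  · rw [if_pos h, pvBBody_comm n1.toList n2.toList]
    intro heq
    have hlen : n1.toList.length ≤ n2.toList.length := by exact_mod_cast le_of_lt h
    rw [Nat.max_eq_right hlen] at hd
    have hA := pvABody_len_of_low n2.toList n1.toList hlen (by linarith [hd])
    have hB := pvBBody_len_of_low n2.toList n1.toList hlen (by linarith [hd])
    have hl : pvABody n2.toList n1.toList = pvBBody n2.toList n1.toList := by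
      have := congrArg String.toList heq
      rwa [pvToList_mk, pvToList_mk] at this
    have h2 := congrArg List.length hl
    omega
  · rw [if_neg h]
    intro heq
    have hlen : n2.toList.length ≤ n1.toList.length := by
      rw [not_lt] at h; exact_mod_cast h
    rw [Nat.max_eq_left hlen] at hd
    have hA := pvABody_len_of_low n1.toList n2.toList hlen (by linarith [hd])
    have hB := pvBBody_len_of_low n1.toList n2.toList hlen (by linarith [hd])
    have hl : pvABody n1.toList n2.toList = pvBBody n1.toList n2.toList := by
      have := congrArg String.toList heq
      rwa [pvToList_mk, pvToList_mk] at this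
    have h2 := congrArg List.length hl
    omega

set_option maxRecDepth 8192 in
theorem snafu_plus_snafu_changed : Claim_changed_snafu_plus_snafu := by
  unfold Claim_changed_snafu_plus_snafu
  exact ⟨by decide, by decide, by decide, by decide, by decide, by decide⟩
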